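-- pv_equiv track=rewrite | github.com/henricobela/Python | Faculdade/Computational Thinking with Python/media_final_fiap.py | remover_menor_nota
-- ===== SOURCE A (Python) =====
-- def remover_menor_nota(c1, c2, c3):
--     """
--     Esta funcao retorna uma lista com as duas maiores notas de checkpoints
--     """
--     checkpoints = [c1, c2, c3]
--     min_grade = None
--     for i in checkpoints:
--         if (min_grade is None or i < min_grade):
--             min_grade = i
--     checkpoints.remove(min_grade)
--     return checkpoints
-- ===== SOURCE B (Python) =====
-- def remover_menor_nota(c1, c2, c3):
--     """
--     Esta funcao retorna uma lista com as duas maiores notas de checkpoints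
--     """
--     if c1 <= c2 and c1 <= c3:
--         return [c2, c3]
--     elif c2 <= c3:
--         return [c1, c3]
--     else:
--         return [c1, c2]
-- ===== Notes on version B (the rewrite author's own statement) =====
-- stated objective: simpler
-- what changed: Replaces the list build, min-finding loop and list.remove mutation by a direct three-way comparison that returns the two surviving grades in place.
import Mathlib
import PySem

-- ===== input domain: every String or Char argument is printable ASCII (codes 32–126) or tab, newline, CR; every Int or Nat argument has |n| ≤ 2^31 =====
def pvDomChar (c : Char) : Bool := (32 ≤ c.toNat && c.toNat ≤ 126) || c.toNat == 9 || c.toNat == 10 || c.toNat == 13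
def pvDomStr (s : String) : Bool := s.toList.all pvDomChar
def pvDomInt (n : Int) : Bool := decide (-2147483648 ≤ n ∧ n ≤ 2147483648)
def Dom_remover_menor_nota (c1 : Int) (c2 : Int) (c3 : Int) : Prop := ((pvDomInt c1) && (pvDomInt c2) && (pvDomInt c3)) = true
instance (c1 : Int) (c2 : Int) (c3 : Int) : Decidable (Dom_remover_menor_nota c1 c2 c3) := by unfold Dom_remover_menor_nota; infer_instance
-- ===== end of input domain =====

-- B replaces A's list/min-loop/remove by a direct three-way comparison (objective: simpler).
-- ===== PORT A =====
-- loop: min_grade starts as none; each i replaces it if none or i < min_grade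
def pvMinStep (min_grade : Option Int) (i : Int) : Option Int :=
  if min_grade.isNone || (match min_grade with | some m => i < m | none => true) then some i else min_grade

def remover_menor_nota (c1 : Int) (c2 : Int) (c3 : Int) : List Int :=
  let checkpoints := [c1, c2, c3]
  let min_grade := checkpoints.foldl pvMinStep none
  -- checkpoints.remove(min_grade): removes the first occurrence; the minimum is always
  -- present, so the none branch of remove? is unreachable (totality guard only)
  match min_grade with
  | none => checkpoints
  | some m => (PySem.List.remove? checkpoints m).getD checkpoints

-- ===== PORT B =====
def remover_menor_nota_alt (c1 : Int) (c2 : Int) (c3 : Int) : List Int :=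
  if c1 ≤ c2 ∧ c1 ≤ c3 then [c2, c3]
  else if c2 ≤ c3 then [c1, c3]
  else [c1, c2]

-- ===== PRECONDITION & SPEC =====
def Spec_remover_menor_nota (c1 : Int) (c2 : Int) (c3 : Int) (out : List Int) : Prop := out = remover_menor_nota_alt c1 c2 c3
instance (c1 : Int) (c2 : Int) (c3 : Int) (out : List Int) : Decidable (Spec_remover_menor_nota c1 c2 c3 out) := by unfold Spec_remover_menor_nota; infer_instance

-- ===== CLAIM (what is proved, stated in full; the proofs are below) =====
def Claim_equal_remover_menor_nota : Prop := ∀ (c1 : Int) (c2 : Int) (c3 : Int), Dom_remover_menor_nota c1 c2 c3 → Spec_remover_menor_nota c1 c2 c3 (remover_menor_nota c1 c2 c3)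

-- ===== LEMMAS AND PROOFS =====

-- ===== VERDICT (by name: the statement is the Claim_ definition above) =====
lemma pvRemove3 (a b c m : Int) :
    PySem.List.remove? [a, b, c] m =
      if a = m then some [b, c]
      else if b = m then some [a, c]
      else if c = m then some [a, b]
      else none := by
  by_cases h1 : a = m
  · subst h1; simp
  · by_cases h2 : b = m
    · subst h2; simp [PySem.List.remove?_cons_of_ne _ h1]
    · by_cases h3 : c = m
      · subst h3
        simp [PySem.List.remove?_cons_of_ne _ h1, PySem.List.remove?_cons_of_ne _ h2, h1, h2]
      · simp [PySem.List.remove?_cons_of_ne _ h1, PySem.List.remove?_cons_of_ne _ h2,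
          PySem.List.remove?_cons_of_ne _ h3,
          PySem.List.remove?_eq_none_iff, h1, h2, h3]

theorem remover_menor_nota_spec : Claim_equal_remover_menor_nota := by
  intro c1 c2 c3 _
  unfold Spec_remover_menor_nota remover_menor_nota remover_menor_nota_alt pvMinStep
  by_cases h12 : c2 < c1 <;> by_cases h13 : c3 < c1 <;> by_cases h23 : c3 < c2 <;>
    simp [pvRemove3, h12, h13, h23] <;>
    (try split_ifs) <;>
    (try subst_eqs) <;>
    first | rfl | omega
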